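-- pv_equiv track=rewrite | github.com/lo-tp/leetcode | dp/LT8674KeysKeyboard.py | maxA
-- ===== SOURCE A (Python) =====
-- def maxA(N):
--     dp = [0]*(N+1)
--     for i in range(1, min(N+1, 4)):
--         dp[i] = i
--     for i in range(4, N+1):
--         dp[i] = dp[i-1]+1
--         for j in range(3, i):
--             dp[i] = max(dp[i], dp[j-2]*(i-j+1))
--     return dp[N]
-- ===== SOURCE B (Python) =====
-- def maxA(N):
--     # O(N) DP: the optimal last "paste block" multiplies a prefix by at most 5,
--     # so only the candidates dp[i-k-1]*k for k in 2..5 need checking.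
--     if N <= 0:
--         return 0
--     dp = [0] * (N + 1)
--     for i in range(1, N + 1):
--         best = dp[i - 1] + 1
--         for k in range(2, 6):
--             if i > k:
--                 best = max(best, dp[i - k - 1] * k)
--         dp[i] = best
--     return dp[N]
-- ===== Notes on version B (the rewrite author's own statement) =====
-- stated objective: faster
-- what changed: replaces A's inner scan over all split points j in 3..i-1 by a constant-size window of candidate multipliers, since a larger multiplier is always dominated by splitting the block
import Mathlib
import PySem

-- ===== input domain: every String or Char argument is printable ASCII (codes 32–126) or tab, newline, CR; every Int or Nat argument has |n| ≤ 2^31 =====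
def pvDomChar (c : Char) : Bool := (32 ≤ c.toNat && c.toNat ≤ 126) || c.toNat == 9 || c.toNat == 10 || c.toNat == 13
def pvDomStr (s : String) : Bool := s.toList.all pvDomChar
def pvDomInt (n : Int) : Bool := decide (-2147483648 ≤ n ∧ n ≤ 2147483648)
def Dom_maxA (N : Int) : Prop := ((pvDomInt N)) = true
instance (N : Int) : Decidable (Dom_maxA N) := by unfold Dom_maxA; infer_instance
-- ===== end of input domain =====

-- B replaces A's quadratic inner scan over all split points by a constant-size window
-- of candidate multipliers per cell; equivalence proved on all of Pre_ (nonnegative N).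

-- ===== PORT A =====
-- dp[i] = max(dp[i], dp[j-2]*(i-j+1)) body of the inner loop
def innerA (i : Int) (dp : List Int) (j : Int) : List Int :=
  PySem.List.pySetD dp i
    (max (PySem.List.pyGetD dp i 0) (PySem.List.pyGetD dp (j - 2) 0 * (i - j + 1)))

-- one iteration of 'for i in range(4, N+1)': dp[i] = dp[i-1]+1; for j in range(3, i): …
def outerA (dp : List Int) (i : Int) : List Int :=
  (PySem.List.pyRange 3 i 1).foldl (innerA i)
    (PySem.List.pySetD dp i (PySem.List.pyGetD dp (i - 1) 0 + 1))

def maxA (N : Int) : Int :=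
  -- [0]*(N+1): empty when N+1 ≤ 0 (toNat clamps, as Python's list repetition does)
  let dp0 : List Int := List.replicate (N + 1).toNat 0
  let dp1 := (PySem.List.pyRange 1 (min (N + 1) 4) 1).foldl
    (fun d i => PySem.List.pySetD d i i) dp0
  let dp2 := (PySem.List.pyRange 4 (N + 1) 1).foldl outerA dp1
  PySem.List.pyGetD dp2 N 0

-- ===== PORT B =====
-- body of 'for k in range(2, 6): if i > k: best = max(best, dp[i-k-1]*k)'
def innerB (i : Int) (dp : List Int) (best : Int) (k : Int) : Int :=
  if k < i then max best (PySem.List.pyGetD dp (i - k - 1) 0 * k) else best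

-- one iteration of 'for i in range(1, N+1)'
def stepB (dp : List Int) (i : Int) : List Int :=
  PySem.List.pySetD dp i
    ((PySem.List.pyRange 2 6 1).foldl (innerB i dp) (PySem.List.pyGetD dp (i - 1) 0 + 1))

def maxA_alt (N : Int) : Int :=
  if N ≤ 0 then 0
  else
    let dp0 : List Int := List.replicate (N + 1).toNat 0
    let dp1 := (PySem.List.pyRange 1 (N + 1) 1).foldl stepB dp0
    PySem.List.pyGetD dp1 N 0

-- ===== PRECONDITION & SPEC =====
-- A raises IndexError (dp[N] on a too-short list) for N < 0; those inputs are excluded.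
def Pre_maxA (N : Int) : Prop := 0 ≤ N
instance (N : Int) : Decidable (Pre_maxA N) := by unfold Pre_maxA; infer_instance
def pvWitness_maxA : Int := 5

def Spec_maxA (N : Int) (out : Int) : Prop := out = maxA_alt N
instance (N : Int) (out : Int) : Decidable (Spec_maxA N out) := by unfold Spec_maxA; infer_instance

-- ===== CLAIM (what is proved, stated in full; the proofs are below) =====
def Claim_equal_maxA : Prop := ∀ (N : Int), Dom_maxA N → Pre_maxA N → Spec_maxA N (maxA N)

-- ===== LEMMAS AND PROOFS =====

-- the value B writes into dp[i], computed from the prefix t = dp[0..i-1]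
def valB (t : List Int) (i : Int) : Int :=
  (PySem.List.pyRange 2 6 1).foldl (innerB i t) (PySem.List.pyGetD t (i - 1) 0 + 1)

-- the value A writes into dp[i]
def valA (t : List Int) (i : Int) : Int :=
  (PySem.List.pyRange 3 i 1).foldl
    (fun c j => max c (PySem.List.pyGetD t (j - 2) 0 * (i - j + 1)))
    (PySem.List.pyGetD t (i - 1) 0 + 1)

-- the common table of dp values
def tbl : Nat → List Int
  | 0 => [0]
  | n + 1 => tbl n ++ [valB (tbl n) ((n : Int) + 1)]

def G (n : Nat) : Int := (tbl n).getD n 0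

theorem tbl_length (n : Nat) : (tbl n).length = n + 1 := by
  induction n with
  | zero => rfl
  | succ n ih => simp [tbl, ih]

theorem tbl_getD (n m : Nat) (h : m ≤ n) : (tbl n).getD m 0 = G m := by
  induction n with
  | zero => interval_cases m; rfl
  | succ n ih =>
    rcases Nat.lt_or_ge m (n + 1) with hm | hm
    · have hlen : m < (tbl n).length := by rw [tbl_length]; omega
      rw [show tbl (n + 1) = tbl n ++ [valB (tbl n) ((n : Int) + 1)] from rfl,
        List.getD_append _ _ _ _ hlen]
      exact ih (by omega)
    · have : m = n + 1 := by omega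
      subst this; rfl

theorem getD_append_at_len (t : List Int) (c : Int) (r : List Int) :
    (t ++ c :: r).getD t.length 0 = c := by
  simp

theorem G_succ (n : Nat) : G (n + 1) = valB (tbl n) ((n : Int) + 1) := by
  unfold G
  rw [show tbl (n + 1) = tbl n ++ [valB (tbl n) ((n : Int) + 1)] from rfl]
  have h := getD_append_at_len (tbl n) (valB (tbl n) ((n : Int) + 1)) []
  rwa [tbl_length] at h

-- reads below the prefix length agree
theorem pyGetD_append_left' (t r : List Int) (z : Int) (h0 : 0 ≤ z)
    (h : z < (t.length : Int)) : PySem.List.pyGetD (t ++ r) z 0 = PySem.List.pyGetD t z 0 := by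
  obtain ⟨m, rfl⟩ : ∃ m : Nat, z = (m : Int) := ⟨z.toNat, by omega⟩
  rw [PySem.List.pyGetD_natCast, PySem.List.pyGetD_natCast,
    List.getD_append _ _ _ _ (by omega)]

theorem tbl_pyGetD (n : Nat) (z : Int) (h0 : 0 ≤ z) (h1 : z ≤ (n : Int)) :
    PySem.List.pyGetD (tbl n) z 0 = G z.toNat := by
  obtain ⟨m, rfl⟩ : ∃ m : Nat, z = (m : Int) := ⟨z.toNat, by omega⟩
  rw [PySem.List.pyGetD_natCast]
  simp only [Int.toNat_natCast]
  exact tbl_getD n m (by omega)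

theorem pyGetD_append_len (t : List Int) (c : Int) (r : List Int) :
    PySem.List.pyGetD (t ++ c :: r) (t.length : Int) 0 = c := by
  rw [PySem.List.pyGetD_natCast]
  exact getD_append_at_len t c r

theorem set_append_cons (t : List Int) (c : Int) (r : List Int) (v : Int) :
    (t ++ c :: r).set t.length v = t ++ v :: r := by
  induction t with
  | nil => rfl
  | cons x t ih => simp [ih]

theorem pySetD_append_cons (t : List Int) (c : Int) (r : List Int) (v : Int) :
    PySem.List.pySetD (t ++ c :: r) (t.length : Int) v = t ++ v :: r := by
  rw [PySem.List.pySetD_natCast, set_append_cons]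

-- innerB only reads dp below index i, so a tail past the prefix is irrelevant
theorem innerB_congr (t r : List Int) (i a k : Int) (hi : i = (t.length : Int))
    (hk : 0 ≤ k) : innerB i (t ++ r) a k = innerB i t a k := by
  by_cases hlt : k < i
  · simp only [innerB, if_pos hlt,
      pyGetD_append_left' t r (i - k - 1) (by omega) (by omega)]
  · simp only [innerB, if_neg hlt]

theorem stepB_char (t r : List Int) (i : Int) (hi : i = (t.length : Int)) (h1 : 1 ≤ i) :
    stepB (t ++ 0 :: r) i = t ++ valB t i :: r := by
  have hfold : ∀ b : Int, (PySem.List.pyRange 2 6 1).foldl (innerB i (t ++ 0 :: r)) b =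
      (PySem.List.pyRange 2 6 1).foldl (innerB i t) b := by
    intro b
    have h26 : PySem.List.pyRange 2 6 1 = [2, 3, 4, 5] := by decide
    simp only [h26, List.foldl_cons, List.foldl_nil,
      innerB_congr t (0 :: r) i _ 2 hi (by norm_num),
      innerB_congr t (0 :: r) i _ 3 hi (by norm_num),
      innerB_congr t (0 :: r) i _ 4 hi (by norm_num),
      innerB_congr t (0 :: r) i _ 5 hi (by norm_num)]
  unfold stepB valB
  rw [hfold, pyGetD_append_left' t (0 :: r) (i - 1) (by omega) (by omega), hi,
    pySetD_append_cons]

theorem innerA_fold (t : List Int) (i : Int) (hi : i = (t.length : Int))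
    (l : List Int) (hl : ∀ j ∈ l, 3 ≤ j ∧ j < i) (c : Int) (r : List Int) :
    l.foldl (innerA i) (t ++ c :: r) =
      t ++ (l.foldl (fun c j => max c (PySem.List.pyGetD t (j - 2) 0 * (i - j + 1))) c) :: r := by
  induction l generalizing c with
  | nil => rfl
  | cons j l ih =>
    obtain ⟨h3, hji⟩ := hl j (by simp)
    have step : innerA i (t ++ c :: r) j =
        t ++ (max c (PySem.List.pyGetD t (j - 2) 0 * (i - j + 1))) :: r := by
      unfold innerA
      rw [pyGetD_append_left' t (c :: r) (j - 2) (by omega) (by omega), hi,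
        pyGetD_append_len, pySetD_append_cons]
    simp only [List.foldl_cons, step]
    exact ih (fun j hj => hl j (by simp [hj])) _

theorem outerA_char (t r : List Int) (i : Int) (hi : i = (t.length : Int)) (h1 : 1 ≤ i) :
    outerA (t ++ 0 :: r) i = t ++ valA t i :: r := by
  unfold outerA valA
  rw [pyGetD_append_left' t (0 :: r) (i - 1) (by omega) (by omega)]
  rw [show PySem.List.pySetD (t ++ 0 :: r) i (PySem.List.pyGetD t (i - 1) 0 + 1) =
      t ++ (PySem.List.pyGetD t (i - 1) 0 + 1) :: r by rw [hi, pySetD_append_cons]]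
  exact innerA_fold t i hi _ (fun j hj => (PySem.List.mem_pyRange_one.mp hj)) _ r

-- elementary facts about the window maximum
theorem innerB_le (i : Int) (t : List Int) (a k : Int) : a ≤ innerB i t a k := by
  unfold innerB; split <;> simp

theorem innerB_cand_le (i : Int) (t : List Int) (a k : Int) (hk : k < i) :
    PySem.List.pyGetD t (i - k - 1) 0 * k ≤ innerB i t a k := by
  unfold innerB; rw [if_pos hk]; exact le_max_right _ _

theorem innerB_le_of (i : Int) (t : List Int) (a k M : Int) (ha : a ≤ M)
    (hc : k < i → PySem.List.pyGetD t (i - k - 1) 0 * k ≤ M) : innerB i t a k ≤ M := by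
  unfold innerB; split
  · exact max_le ha (hc (by assumption))
  · exact ha

theorem valB_unfold (t : List Int) (i : Int) : valB t i =
    innerB i t (innerB i t (innerB i t (innerB i t (PySem.List.pyGetD t (i - 1) 0 + 1) 2) 3) 4) 5 := by
  rw [valB, show PySem.List.pyRange 2 6 1 = [2, 3, 4, 5] from by decide]
  rfl

theorem valB_base_le (t : List Int) (i : Int) :
    PySem.List.pyGetD t (i - 1) 0 + 1 ≤ valB t i := by
  rw [valB_unfold]
  exact le_trans (le_trans (le_trans (innerB_le _ _ _ _) (innerB_le _ _ _ _))
    (innerB_le _ _ _ _)) (innerB_le _ _ _ _)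

theorem valB_cand_le (t : List Int) (i k : Int) (h2 : 2 ≤ k) (h5 : k ≤ 5) (hk : k < i) :
    PySem.List.pyGetD t (i - k - 1) 0 * k ≤ valB t i := by
  rw [valB_unfold]
  interval_cases k
  · exact le_trans (innerB_cand_le _ _ _ _ hk)
      (le_trans (le_trans (innerB_le _ _ _ _) (innerB_le _ _ _ _)) (innerB_le _ _ _ _))
  · exact le_trans (innerB_cand_le _ _ _ _ hk)
      (le_trans (innerB_le _ _ _ _) (innerB_le _ _ _ _))
  · exact le_trans (innerB_cand_le _ _ _ _ hk) (innerB_le _ _ _ _)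
  · exact innerB_cand_le _ _ _ _ hk

theorem valB_le (t : List Int) (i M : Int)
    (hb : PySem.List.pyGetD t (i - 1) 0 + 1 ≤ M)
    (hc : ∀ k : Int, 2 ≤ k → k ≤ 5 → k < i → PySem.List.pyGetD t (i - k - 1) 0 * k ≤ M) :
    valB t i ≤ M := by
  rw [valB_unfold]
  exact innerB_le_of _ _ _ _ _ (innerB_le_of _ _ _ _ _ (innerB_le_of _ _ _ _ _
    (innerB_le_of _ _ _ _ _ hb (hc 2 (by norm_num) (by norm_num)))
    (hc 3 (by norm_num) (by norm_num))) (hc 4 (by norm_num) (by norm_num)))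
    (hc 5 (by norm_num) (by norm_num))

theorem G_zero : G 0 = 0 := rfl

theorem G_step (n : Nat) : G n + 1 ≤ G (n + 1) := by
  have h := valB_base_le (tbl n) ((n : Int) + 1)
  rw [show (n : Int) + 1 - 1 = (n : Int) by ring,
    tbl_pyGetD n (n : Int) (by omega) (by omega)] at h
  simp only [Int.toNat_natCast] at h
  rw [G_succ]
  exact h

theorem G_nonneg (n : Nat) : 0 ≤ G n := by
  induction n with
  | zero => simp [G_zero]
  | succ n ih => have := G_step n; omega

theorem G_double (n : Nat) : 2 * G n ≤ G (n + 3) := by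
  have h := valB_cand_le (tbl (n + 2)) (((n + 2 : Nat) : Int) + 1) 2 (by norm_num) (by norm_num)
    (by push_cast; omega)
  rw [show ((n + 2 : Nat) : Int) + 1 - 2 - 1 = (n : Int) by push_cast; ring,
    tbl_pyGetD (n + 2) (n : Int) (by omega) (by push_cast; omega)] at h
  simp only [Int.toNat_natCast] at h
  rw [← G_succ (n + 2)] at h
  have e : n + 2 + 1 = n + 3 := by omega
  rw [e] at h
  linarith

-- every candidate of A's full scan is dominated by the 4-candidate window
theorem cand_le_valB (n : Nat) (d : Nat) (j : Int) (h3 : 3 ≤ j) (hj : j < (n : Int) + 1)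
    (hd : (n : Int) + 1 - j = (d : Int)) :
    PySem.List.pyGetD (tbl n) (j - 2) 0 * ((n : Int) + 1 - j + 1) ≤ valB (tbl n) ((n : Int) + 1) := by
  induction d using Nat.strong_induction_on generalizing j with
  | _ d ih =>
    by_cases hsmall : (n : Int) + 1 - j ≤ 4
    · have h := valB_cand_le (tbl n) ((n : Int) + 1) ((n : Int) + 1 - j + 1)
        (by omega) (by omega) (by omega)
      rw [show (n : Int) + 1 - ((n : Int) + 1 - j + 1) - 1 = j - 2 by ring] at h
      exact h
    · have ha := tbl_pyGetD n (j - 2) (by omega) (by omega)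
      have hb := tbl_pyGetD n (j + 1) (by omega) (by omega)
      have hdd : (j + 1).toNat = (j - 2).toNat + 3 := by omega
      have h2 := G_double (j - 2).toNat
      have ha0 := G_nonneg (j - 2).toNat
      have step : PySem.List.pyGetD (tbl n) (j - 2) 0 * ((n : Int) + 1 - j + 1) ≤
          PySem.List.pyGetD (tbl n) (j + 1) 0 * ((n : Int) + 1 - (j + 3) + 1) := by
        rw [ha, hb, hdd]
        nlinarith [mul_le_mul_of_nonneg_right h2
            (show (0 : Int) ≤ (n : Int) + 1 - (j + 3) + 1 by omega),
          mul_le_mul_of_nonneg_left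
            (show ((n : Int) + 1 - j + 1) ≤ 2 * ((n : Int) + 1 - (j + 3) + 1) by omega) ha0]
      have hm : d - 3 < d := by omega
      have hj3' : (3 : Int) ≤ j + 3 := by omega
      have hjlt : j + 3 < (n : Int) + 1 := by omega
      have hd' : (n : Int) + 1 - (j + 3) = ((d - 3 : Nat) : Int) := by omega
      have hrec := ih (d - 3) hm (j + 3) hj3' hjlt hd'
      rw [show j + 3 - 2 = j + 1 by ring] at hrec
      exact le_trans step hrec

theorem valA_eq_valB (n : Nat) (h : 3 ≤ n) :
    valA (tbl n) ((n : Int) + 1) = valB (tbl n) ((n : Int) + 1) := by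
  have hbase := valB_base_le (tbl n) ((n : Int) + 1)
  apply le_antisymm
  · unfold valA
    rw [← List.foldl_map]
    rcases PySem.List.foldl_max_mem ((PySem.List.pyRange 3 ((n : Int) + 1) 1).map
        (fun j => PySem.List.pyGetD (tbl n) (j - 2) 0 * ((n : Int) + 1 - j + 1)))
        (PySem.List.pyGetD (tbl n) ((n : Int) + 1 - 1) 0 + 1) with hcase | hcase
    · rw [hcase]; exact hbase
    · obtain ⟨j, hjmem, hfj⟩ := List.mem_map.mp hcase
      obtain ⟨hj3, hji⟩ := PySem.List.mem_pyRange_one.mp hjmem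
      rw [← hfj]
      simpa using cand_le_valB n (((n : Int) + 1 - j).toNat) j hj3 hji (by omega)
  · apply valB_le
    · exact (PySem.List.le_foldl_max_int _ _ _).1
    · intro k h2 h5 hk
      by_cases hcase : k ≤ (n : Int) + 1 - 2
      · have hmem : ((n : Int) + 1 - k + 1) ∈ PySem.List.pyRange 3 ((n : Int) + 1) 1 :=
          PySem.List.mem_pyRange_one.mpr ⟨by omega, by omega⟩
        have hle := (PySem.List.le_foldl_max_int (PySem.List.pyRange 3 ((n : Int) + 1) 1)
          (fun j => PySem.List.pyGetD (tbl n) (j - 2) 0 * ((n : Int) + 1 - j + 1))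
          (PySem.List.pyGetD (tbl n) ((n : Int) + 1 - 1) 0 + 1)).2 _ hmem
        simp only at hle
        rw [show (n : Int) + 1 - ((n : Int) + 1 - k + 1) + 1 = k by ring,
          show (n : Int) + 1 - k + 1 - 2 = (n : Int) + 1 - k - 1 by ring] at hle
        exact hle
      · have hidx : (n : Int) + 1 - k - 1 = 0 := by omega
        have h0 : PySem.List.pyGetD (tbl n) ((n : Int) + 1 - k - 1) 0 = 0 := by
          rw [hidx, tbl_pyGetD n 0 le_rfl (by omega)]; rfl
        have hb2 : 0 ≤ PySem.List.pyGetD (tbl n) ((n : Int) + 1 - 1) 0 + 1 := by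
          rw [show (n : Int) + 1 - 1 = (n : Int) by omega,
            tbl_pyGetD n (n : Int) (by omega) (by omega)]
          have := G_nonneg ((n : Int)).toNat; omega
        have hbb := (PySem.List.le_foldl_max_int (PySem.List.pyRange 3 ((n : Int) + 1) 1)
          (fun j => PySem.List.pyGetD (tbl n) (j - 2) 0 * ((n : Int) + 1 - j + 1))
          (PySem.List.pyGetD (tbl n) ((n : Int) + 1 - 1) 0 + 1)).1
        rw [h0, zero_mul]
        exact le_trans hb2 hbb

theorem tbl_three : tbl 3 = [0, 1, 2, 3] := by decide

-- the state of B's loop after processing i = 1 .. m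
theorem foldB (n : Nat) (m : Nat) (hm : m ≤ n) :
    (PySem.List.pyRange 1 ((m : Int) + 1) 1).foldl stepB (List.replicate (n + 1) 0) =
      tbl m ++ List.replicate (n - m) 0 := by
  induction m with
  | zero =>
    rw [show ((0 : Nat) : Int) + 1 = 1 by norm_num, PySem.List.pyRange_one_eq_nil le_rfl]
    rfl
  | succ m ih =>
    rw [show ((m + 1 : Nat) : Int) + 1 = ((m : Int) + 1) + 1 by push_cast; ring,
      PySem.List.pyRange_one_succ_right (by omega), List.foldl_append, ih (by omega)]
    simp only [List.foldl_cons, List.foldl_nil]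
    have hrep : List.replicate (n - m) (0 : Int) = 0 :: List.replicate (n - m - 1) 0 := by
      rw [← List.replicate_succ]; congr 1; omega
    rw [hrep, stepB_char (tbl m) _ ((m : Int) + 1) (by rw [tbl_length]; push_cast; ring) (by omega)]
    rw [show tbl (m + 1) = tbl m ++ [valB (tbl m) ((m : Int) + 1)] from rfl]
    simp only [List.append_assoc, List.singleton_append]
    congr 2

-- the state of A's second loop after processing i = 4 .. m
theorem foldA (n : Nat) (m : Nat) (h3 : 3 ≤ m) (hm : m ≤ n) :
    (PySem.List.pyRange 4 ((m : Int) + 1) 1).foldl outerA (tbl 3 ++ List.replicate (n - 3) 0) =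
      tbl m ++ List.replicate (n - m) 0 := by
  induction m, h3 using Nat.le_induction with
  | base =>
    rw [show ((3 : Nat) : Int) + 1 = 4 by norm_num, PySem.List.pyRange_one_eq_nil le_rfl]
    rfl
  | succ m hm3 ih =>
    rw [show ((m + 1 : Nat) : Int) + 1 = ((m : Int) + 1) + 1 by push_cast; ring,
      PySem.List.pyRange_one_succ_right (by omega), List.foldl_append, ih (by omega)]
    simp only [List.foldl_cons, List.foldl_nil]
    have hrep : List.replicate (n - m) (0 : Int) = 0 :: List.replicate (n - m - 1) 0 := by
      rw [← List.replicate_succ]; congr 1; omega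
    rw [hrep, outerA_char (tbl m) _ ((m : Int) + 1) (by rw [tbl_length]; push_cast; ring) (by omega),
      valA_eq_valB m (by omega)]
    rw [show tbl (m + 1) = tbl m ++ [valB (tbl m) ((m : Int) + 1)] from rfl]
    simp only [List.append_assoc, List.singleton_append]
    congr 2

theorem maxA_eq_G (n : Nat) (h : 4 ≤ n) : maxA (n : Int) = G n := by
  unfold maxA
  rw [show min ((n : Int) + 1) 4 = 4 by omega,
    show PySem.List.pyRange 1 4 1 = [1, 2, 3] from by decide,
    show ((n : Int) + 1).toNat = n + 1 by omega]
  have hrep : List.replicate (n + 1) (0 : Int) = 0 :: 0 :: 0 :: 0 :: List.replicate (n - 3) 0 := by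
    rw [show n + 1 = (n - 3) + 1 + 1 + 1 + 1 by omega]
    simp [List.replicate_succ]
  rw [hrep]
  simp only [List.foldl_cons, List.foldl_nil]
  rw [show PySem.List.pySetD (0 :: 0 :: 0 :: 0 :: List.replicate (n - 3) (0 : Int)) 1 1 =
      0 :: 1 :: 0 :: 0 :: List.replicate (n - 3) 0 by
    simp [PySem.List.pySetD_of_nonneg]]
  rw [show PySem.List.pySetD (0 :: 1 :: 0 :: 0 :: List.replicate (n - 3) (0 : Int)) 2 2 =
      0 :: 1 :: 2 :: 0 :: List.replicate (n - 3) 0 by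
    simp [PySem.List.pySetD_of_nonneg]]
  rw [show PySem.List.pySetD (0 :: 1 :: 2 :: 0 :: List.replicate (n - 3) (0 : Int)) 3 3 =
      0 :: 1 :: 2 :: 3 :: List.replicate (n - 3) 0 by
    simp [PySem.List.pySetD_of_nonneg]]
  rw [show (0 : Int) :: 1 :: 2 :: 3 :: List.replicate (n - 3) (0 : Int) =
      tbl 3 ++ List.replicate (n - 3) 0 by rw [tbl_three]; rfl]
  rw [foldA n n (by omega) le_rfl]
  simp only [Nat.sub_self, List.replicate_zero, List.append_nil]
  rw [tbl_pyGetD n (n : Int) (by omega) le_rfl]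
  simp

theorem maxA_alt_eq_G (n : Nat) (h : 1 ≤ n) : maxA_alt (n : Int) = G n := by
  have e : maxA_alt (n : Int) = PySem.List.pyGetD
      ((PySem.List.pyRange 1 ((n : Int) + 1) 1).foldl stepB
        (List.replicate (((n : Int) + 1).toNat) 0)) (n : Int) 0 := by
    unfold maxA_alt; rw [if_neg (by omega)]
  rw [e, show ((n : Int) + 1).toNat = n + 1 by omega, foldB n n le_rfl]
  simp only [Nat.sub_self, List.replicate_zero, List.append_nil]
  rw [tbl_pyGetD n (n : Int) (by omega) le_rfl]
  simp

-- ===== VERDICT (by name: the statement is the Claim_ definition above) =====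
theorem maxA_spec : Claim_equal_maxA := by
  intro N _ hN
  unfold Spec_maxA
  by_cases h4 : 4 ≤ N
  · have hn : N = ((N.toNat : Nat) : Int) := by omega
    rw [hn, maxA_eq_G N.toNat (by omega), maxA_alt_eq_G N.toNat (by omega)]
  · unfold Pre_maxA at hN
    interval_cases N <;> decide
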